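-- pv_equiv track=rewrite | github.com/JangHyunGyu/nevergrad | scripts/sort_prompts.py | parse_subsections
-- ===== SOURCE A (Python) =====
-- def parse_subsections(sec_lines):
--     sub_starts = [i for i, line in enumerate(sec_lines) if line.startswith('### ')]
--     first_sub = sub_starts[0] if sub_starts else len(sec_lines)
--     header = sec_lines[:first_sub]
--     blocks = {}
--     for idx, start in enumerate(sub_starts):
--         end = sub_starts[idx+1] if idx+1 < len(sub_starts) else len(sec_lines)
--         key = sec_lines[start].replace('### ', '').strip()
--         blocks[key] = sec_lines[start:end]
--     return header, blocks
-- ===== SOURCE B (Python) =====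
-- def parse_subsections(sec_lines):
--     header = []
--     blocks = {}
--     current = header
--     for line in sec_lines:
--         if line.startswith('### '):
--             current = [line]
--             blocks[line.replace('### ', '').strip()] = current
--         else:
--             current.append(line)
--     return header, blocks
-- ===== Notes on version B (the rewrite author's own statement) =====
-- stated objective: simpler
-- what changed: Replaces A's two-pass scheme (precompute all '### ' start indices, then slice between consecutive indices) with a single streaming pass that keeps a header list and a current block, appending each line to whichever block is open.
import Mathlib
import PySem

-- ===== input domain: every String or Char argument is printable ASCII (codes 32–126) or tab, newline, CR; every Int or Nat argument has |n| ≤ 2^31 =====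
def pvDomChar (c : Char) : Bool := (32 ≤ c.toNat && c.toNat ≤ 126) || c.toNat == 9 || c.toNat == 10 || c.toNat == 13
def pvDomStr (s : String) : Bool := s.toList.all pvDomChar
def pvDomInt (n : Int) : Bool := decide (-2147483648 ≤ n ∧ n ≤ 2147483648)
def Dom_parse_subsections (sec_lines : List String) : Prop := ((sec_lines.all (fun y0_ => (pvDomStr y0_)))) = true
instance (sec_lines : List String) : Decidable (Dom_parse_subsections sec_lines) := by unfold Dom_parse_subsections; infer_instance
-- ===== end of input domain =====

-- B replaces A's two-pass index/slice scheme with one streaming pass keeping a current block (objective: simpler).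
-- Python B mutates the list object `current` aliased by the dict; the port models that by tracking the current block's key.

-- ===== PORT A =====
-- shared literal fragments of both Pythons: line.startswith('### ') and line.replace('### ', '').strip()
def pvIsSub (line : String) : Bool := PySem.Str.startswith line "### "
def pvKey (line : String) : String := PySem.Str.strip (PySem.Str.replace line "### " "")

def parse_subsections (sec_lines : List String) : List String × (List (String × List String)) :=
  let sub_starts : List Int :=
    ((PySem.List.enumerate sec_lines).filter (fun p => pvIsSub p.2)).map Prod.fst
  let first_sub : Int := match sub_starts with
    | [] => (sec_lines.length : Int)
    | i :: _ => i
  let header := PySem.List.slice sec_lines none (some first_sub)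
  let blocks : PySem.Dict String (List String) :=
    (PySem.List.enumerate sub_starts).foldl (fun d p =>
      let endi : Int := if p.1 + 1 < (sub_starts.length : Int)
        then PySem.List.pyGetD sub_starts (p.1 + 1) 0
        else (sec_lines.length : Int)
      d.insert (pvKey (PySem.List.pyGetD sec_lines p.2 ""))
               (PySem.List.slice sec_lines (some p.2) (some endi))) PySem.Dict.empty
  (header, blocks.items)

-- ===== PORT B =====
-- state: (header so far, blocks dict, key of the current block — none while still in the header)
def pvStepB (st : List String × PySem.Dict String (List String) × Option String) (line : String) :
    List String × PySem.Dict String (List String) × Option String :=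
  if pvIsSub line then
    let k := pvKey line
    (st.1, st.2.1.insert k [line], some k)
  else
    match st.2.2 with
    | none => (st.1 ++ [line], st.2.1, none)
    | some k => (st.1, st.2.1.modify k [] (· ++ [line]), some k)

def parse_subsections_alt (sec_lines : List String) : List String × (List (String × List String)) :=
  let st := sec_lines.foldl pvStepB ([], PySem.Dict.empty, none)
  (st.1, st.2.1.items)

-- ===== PRECONDITION & SPEC =====
def Spec_parse_subsections (sec_lines : List String) (out : List String × (List (String × List String))) : Prop := out = parse_subsections_alt sec_lines
instance (sec_lines : List String) (out : List String × (List (String × List String))) : Decidable (Spec_parse_subsections sec_lines out) := by unfold Spec_parse_subsections; infer_instance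

-- ===== CLAIM (what is proved, stated in full; the proofs are below) =====
def Claim_equal_parse_subsections : Prop := ∀ (sec_lines : List String), Dom_parse_subsections sec_lines → Spec_parse_subsections sec_lines (parse_subsections sec_lines)

-- ===== LEMMAS AND PROOFS =====

-- canonical decomposition both ports are reduced to
def pvTake (xs : List String) : List String := xs.takeWhile (fun l => !pvIsSub l)
def pvDrop (xs : List String) : List String := xs.dropWhile (fun l => !pvIsSub l)

def pvBlocks : List String → List (String × List String)
  | [] => []
  | l :: ls => (pvKey l, l :: pvTake ls) :: pvBlocks (pvDrop ls)
termination_by xs => xs.length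
decreasing_by
  simp only [List.length_cons]
  exact Nat.lt_succ_of_le (List.length_dropWhile_le _ _)

def pvIns (d : PySem.Dict String (List String)) (ps : List (String × List String)) :
    PySem.Dict String (List String) :=
  ps.foldl (fun d p => d.insert p.1 p.2) d

def pvSA (xs : List String) : List Int :=
  ((PySem.List.enumerate xs).filter (fun p => pvIsSub p.2)).map Prod.fst

def pvAP (xs : List String) : List (String × List String) :=
  ((pvSA xs).zip ((pvSA xs).drop 1 ++ [(xs.length : Int)])).map
    (fun q => (pvKey (PySem.List.pyGetD xs q.1 ""), PySem.List.slice xs (some q.1) (some q.2)))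

lemma pvBlocks_nil : pvBlocks [] = [] := by rw [pvBlocks]

lemma pvBlocks_cons (l : String) (ls : List String) :
    pvBlocks (l :: ls) = (pvKey l, l :: pvTake ls) :: pvBlocks (pvDrop ls) := by
  rw [pvBlocks]

lemma pvIns_cons (d : PySem.Dict String (List String)) (p : String × List String)
    (ps : List (String × List String)) : pvIns d (p :: ps) = pvIns (d.insert p.1 p.2) ps := rfl

lemma pvDrop_nil : pvDrop [] = [] := rfl

lemma pv_mem_SA {xs : List String} {i : Int} (h : i ∈ pvSA xs) :
    ∃ k : Nat, i = (k : Int) ∧ k < xs.length := by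
  unfold pvSA at h
  simp only [List.mem_map, List.mem_filter] at h
  obtain ⟨p, ⟨hp, -⟩, rfl⟩ := h
  rw [PySem.List.mem_enumerate_iff] at hp
  obtain ⟨k, hk, rfl⟩ := hp
  exact ⟨k, by simp, hk⟩

lemma pv_enumerate_shift {α : Type} (xs : List α) (s : Int) :
    PySem.List.enumerate xs (s + 1) = (PySem.List.enumerate xs s).map (fun p => (p.1 + 1, p.2)) := by
  induction xs generalizing s with
  | nil => simp [PySem.List.enumerate_nil]
  | cons a t ih => simp [PySem.List.enumerate_cons, ih]

lemma pvSA_cons (l : String) (ls : List String) :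
    pvSA (l :: ls) = (if pvIsSub l then [(0 : Int)] else []) ++ (pvSA ls).map (· + 1) := by
  unfold pvSA
  rw [PySem.List.enumerate_cons, show (0:Int) + 1 = 0 + 1 from rfl, pv_enumerate_shift]
  by_cases hm : pvIsSub l <;>
    simp [hm, List.filter_map, List.map_map, Function.comp_def]

-- A's enumerate-with-index-lookup loop, as a zip with successors
lemma pv_take_findIdx (p : String → Bool) (l : List String) :
    l.take (l.findIdx p) = l.takeWhile (fun x => !p x) := by
  induction l with
  | nil => simp
  | cons a t ih =>
    by_cases h : p a <;> simp [List.findIdx_cons, h, ih]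

lemma pvSA_nil : pvSA ([] : List String) = [] := rfl

lemma pv_first_sub (xs : List String) :
    (match pvSA xs with
      | [] => (xs.length : Int)
      | i :: _ => i) = (xs.findIdx pvIsSub : Int) := by
  induction xs with
  | nil => simp [pvSA_nil]
  | cons l ls ih =>
    rw [pvSA_cons]
    by_cases hm : pvIsSub l
    · simp [hm, List.findIdx_cons]
    · cases h : pvSA ls with
      | nil =>
        rw [h] at ih
        simp only [h] at *
        simp only [hm, Bool.false_eq_true, if_false, List.nil_append, List.map_nil]
        simp [List.findIdx_cons, hm, ← ih]
      | cons i t =>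
        rw [h] at ih
        simp only [h] at *
        simp [hm, List.findIdx_cons, ← ih]

lemma pv_idxmap (xs : List String) :
    (PySem.List.enumerate (pvSA xs)).map (fun p =>
      (pvKey (PySem.List.pyGetD xs p.2 ""),
       PySem.List.slice xs (some p.2) (some (if p.1 + 1 < ((pvSA xs).length : Int)
          then PySem.List.pyGetD (pvSA xs) (p.1 + 1) 0 else (xs.length : Int))))) = pvAP xs := by
  unfold pvAP
  apply List.ext_getElem
  · simp [PySem.List.length_enumerate, List.length_zip]
    omega
  · intro k hk1 hk2
    have hk : k < (pvSA xs).length := by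
      simpa [PySem.List.length_enumerate] using hk1
    simp only [List.getElem_map, PySem.List.getElem_enumerate, List.getElem_zip]
    have hsecond : ((pvSA xs).drop 1 ++ [(xs.length : Int)])[k]'(by simp; omega) =
        if (0 : Int) + (k : Int) + 1 < ((pvSA xs).length : Int)
        then PySem.List.pyGetD (pvSA xs) ((0 : Int) + (k : Int) + 1) 0
        else (xs.length : Int) := by
      rw [List.getElem_append]
      by_cases hlt : k + 1 < (pvSA xs).length
      · rw [dif_pos (by simp; omega), if_pos (by omega)]
        have hcast : (0 : Int) + (k : Int) + 1 = ((k + 1 : Nat) : Int) := by push_cast; ring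
        rw [hcast, PySem.List.pyGetD_natCast, List.getD_eq_getElem _ _ hlt, List.getElem_drop]
        congr 1
        omega
      · rw [dif_neg (by simp; omega), if_neg (by omega)]
        simp
    rw [hsecond]

lemma pv_drop_findIdx (p : String → Bool) (l : List String) :
    l.drop (l.findIdx p) = l.dropWhile (fun x => !p x) := by
  induction l with
  | nil => simp
  | cons a t ih =>
    by_cases h : p a <;> simp [List.findIdx_cons, h, ih]

lemma pv_shift (l : String) (ls : List String) :
    (((pvSA ls).map (· + 1)).zip (((pvSA ls).map (· + 1)).drop 1 ++ [((ls.length : Int) + 1)])).map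
      (fun q => (pvKey (PySem.List.pyGetD (l :: ls) q.1 ""),
        PySem.List.slice (l :: ls) (some q.1) (some q.2))) = pvAP ls := by
  have hmap : ((pvSA ls).map (· + 1)).drop 1 ++ [((ls.length : Int) + 1)] =
      ((pvSA ls).drop 1 ++ [(ls.length : Int)]).map (· + 1) := by
    simp
  rw [hmap, List.zip_map, List.map_map]
  unfold pvAP
  apply List.map_congr_left
  intro q hq
  obtain ⟨q1, q2⟩ := q
  have h12 := List.of_mem_zip hq
  obtain ⟨a, rfl, ha⟩ := pv_mem_SA h12.1
  have hb : ∃ b : Nat, q2 = (b : Int) := by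
    rcases List.mem_append.1 h12.2 with h | h
    · obtain ⟨b, hb, -⟩ := pv_mem_SA (List.mem_of_mem_drop h)
      exact ⟨b, hb⟩
    · simp only [List.mem_singleton] at h
      exact ⟨ls.length, h⟩
  obtain ⟨b, rfl⟩ := hb
  simp only [Function.comp_apply, Prod.map_apply]
  have ha1 : (a : Int) + 1 = ((a + 1 : Nat) : Int) := by push_cast; ring
  have hb1 : (b : Int) + 1 = ((b + 1 : Nat) : Int) := by push_cast; ring
  simp only [ha1, hb1, PySem.List.pyGetD_natCast, PySem.List.slice_natCast, Prod.mk.injEq]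
  constructor
  · simp [List.getD]
  · simp only [List.drop_succ_cons]
    congr 1
    omega

lemma pvAP_eq (xs : List String) : pvAP xs = pvBlocks (pvDrop xs) := by
  induction xs with
  | nil => simp [pvAP, pvSA_nil, pvDrop_nil, pvBlocks_nil]
  | cons l ls ih =>
    by_cases hm : pvIsSub l
    · have hdrop : pvDrop (l :: ls) = l :: ls := by simp [pvDrop, hm]
      rw [hdrop, pvBlocks_cons]
      have hfi := pv_first_sub ls
      have hsh := pv_shift l ls
      unfold pvAP
      rw [pvSA_cons]
      simp only [hm, if_true, List.singleton_append]
      have hL : (((l :: ls).length : Nat) : Int) = (ls.length : Int) + 1 := by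
        simp
      rw [hL]
      cases hs : pvSA ls with
      | nil =>
        rw [hs] at hfi
        have hfi2 : (ls.length : Int) = (ls.findIdx pvIsSub : Int) := hfi
        have hno : ls.findIdx pvIsSub = ls.length := by exact_mod_cast hfi2.symm
        have htake : pvTake ls = ls := by
          rw [pvTake, ← pv_take_findIdx, hno, List.take_length]
        have hdrop2 : pvDrop ls = [] := by
          rw [pvDrop, ← pv_drop_findIdx, hno, List.drop_length]
        have hsl : PySem.List.slice (l :: ls) (some 0) (some ((ls.length : Int) + 1)) = l :: ls := by
          have := PySem.List.slice_natCast (l :: ls) 0 (ls.length + 1)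
          simpa using this
        simp [hsl, htake, hdrop2, pvBlocks_nil]
      | cons i t =>
        rw [hs] at hfi hsh
        have hmem : i ∈ pvSA ls := by rw [hs]; exact List.mem_cons_self
        obtain ⟨a, hia, haa⟩ := pv_mem_SA hmem
        rw [hia] at hfi
        have hfi2 : (a : Int) = (ls.findIdx pvIsSub : Int) := hfi
        have haf : a = ls.findIdx pvIsSub := by exact_mod_cast hfi2
        have htake : ls.take a = pvTake ls := by rw [haf, pvTake, pv_take_findIdx]
        simp only [List.map_cons, List.drop_succ_cons, List.drop_zero, List.cons_append,
          List.zip_cons_cons, List.map_cons] at hsh ⊢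
        simp only [List.cons.injEq]
        refine ⟨?_, ?_⟩
        · rw [hia]
          have hsl : PySem.List.slice (l :: ls) (some 0) (some ((a : Int) + 1)) =
              l :: ls.take a := by
            have := PySem.List.slice_natCast (l :: ls) 0 (a + 1)
            simpa [List.take_succ_cons] using this
          simp [hsl, htake]
        · rw [hsh, ih]
    · have hdrop : pvDrop (l :: ls) = pvDrop ls := by simp [pvDrop, hm]
      rw [hdrop, ← ih]
      unfold pvAP
      rw [pvSA_cons]
      simp only [hm, Bool.false_eq_true, if_false, List.nil_append]
      have hL : (((l :: ls).length : Nat) : Int) = (ls.length : Int) + 1 := by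
        simp
      rw [hL]
      exact pv_shift l ls

lemma pvA_eq (xs : List String) :
    parse_subsections xs = (pvTake xs, (pvIns PySem.Dict.empty (pvBlocks (pvDrop xs))).items) := by
  unfold parse_subsections
  have hfold : (PySem.List.enumerate (pvSA xs)).foldl (fun d p =>
      d.insert (pvKey (PySem.List.pyGetD xs p.2 ""))
        (PySem.List.slice xs (some p.2) (some (if p.1 + 1 < ((pvSA xs).length : Int)
          then PySem.List.pyGetD (pvSA xs) (p.1 + 1) 0 else (xs.length : Int))))) PySem.Dict.empty
      = pvIns PySem.Dict.empty (pvAP xs) := by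
    rw [← pv_idxmap, pvIns, List.foldl_map]
  dsimp only
  rw [show List.map Prod.fst (List.filter (fun p => pvIsSub p.2) (PySem.List.enumerate xs)) =
    pvSA xs from rfl]
  rw [hfold, pvAP_eq, pv_first_sub, PySem.List.slice_to_natCast, pv_take_findIdx, pvTake]

lemma pv_modify_insert (d : PySem.Dict String (List String)) (k : String)
    (v : List String) (f : List String → List String) :
    (d.insert k v).modify k [] f = d.insert k (f v) := by
  simp [PySem.Dict.modify, PySem.Dict.getD_insert_self, PySem.Dict.insert_insert_self]

lemma pvB_phase2 (xs : List String) (h : List String) (d : PySem.Dict String (List String))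
    (k : String) (v : List String) :
    (xs.foldl pvStepB (h, d.insert k v, some k)).1 = h ∧
    (xs.foldl pvStepB (h, d.insert k v, some k)).2.1 =
      pvIns (d.insert k (v ++ pvTake xs)) (pvBlocks (pvDrop xs)) := by
  induction xs generalizing d k v with
  | nil => simp [pvTake, pvDrop, pvBlocks_nil, pvIns]
  | cons l ls ih =>
    by_cases hm : pvIsSub l
    · have hstep : pvStepB (h, d.insert k v, some k) l =
          (h, (d.insert k v).insert (pvKey l) [l], some (pvKey l)) := by
        simp [pvStepB, hm]
      rw [List.foldl_cons, hstep]
      refine ⟨(ih _ _ _).1, ?_⟩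
      rw [(ih _ _ _).2]
      simp [pvTake, pvDrop, hm, pvBlocks_cons, pvIns_cons]
    · have hstep : pvStepB (h, d.insert k v, some k) l =
          (h, d.insert k (v ++ [l]), some k) := by
        simp [pvStepB, hm, pv_modify_insert]
      rw [List.foldl_cons, hstep]
      refine ⟨(ih _ _ _).1, ?_⟩
      rw [(ih _ _ _).2]
      simp [pvTake, pvDrop, hm, List.append_assoc]

lemma pvB_phase1 (xs : List String) (h : List String) (d : PySem.Dict String (List String)) :
    (xs.foldl pvStepB (h, d, none)).1 = h ++ pvTake xs ∧
    (xs.foldl pvStepB (h, d, none)).2.1 = pvIns d (pvBlocks (pvDrop xs)) := by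
  induction xs generalizing h with
  | nil => simp [pvTake, pvDrop, pvBlocks_nil, pvIns]
  | cons l ls ih =>
    by_cases hm : pvIsSub l
    · have hstep : pvStepB (h, d, none) l = (h, d.insert (pvKey l) [l], some (pvKey l)) := by
        simp [pvStepB, hm]
      rw [List.foldl_cons, hstep]
      have h2 := pvB_phase2 ls h d (pvKey l) [l]
      refine ⟨by rw [h2.1]; simp [pvTake, hm], ?_⟩
      rw [h2.2]
      simp [pvDrop, hm, pvBlocks_cons, pvIns_cons]
    · have hstep : pvStepB (h, d, none) l = (h ++ [l], d, none) := by
        simp [pvStepB, hm]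
      rw [List.foldl_cons, hstep]
      refine ⟨by rw [(ih _).1]; simp [pvTake, hm], ?_⟩
      rw [(ih _).2]
      simp [pvDrop, hm]

lemma pvB_eq (xs : List String) :
    parse_subsections_alt xs = (pvTake xs, (pvIns PySem.Dict.empty (pvBlocks (pvDrop xs))).items) := by
  have := pvB_phase1 xs [] PySem.Dict.empty
  simp only [parse_subsections_alt, this.1, this.2, List.nil_append]

-- ===== VERDICT (by name: the statement is the Claim_ definition above) =====
theorem parse_subsections_spec : Claim_equal_parse_subsections := by
  intro xs _
  unfold Spec_parse_subsections
  rw [pvA_eq, pvB_eq]
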